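-- pv_equiv track=rewrite | github.com/antontomusiak/TopCoder | srm655/bichrome_board.py | ableToDraw
-- ===== SOURCE A (Python) =====
-- def ableToDraw(board):
-- 	b, w = 'B?', 'W?'
-- 	minFix1, minFix2 = 0, 0
-- 	for i in range(0, len(board), 2):
-- 		for j in range(len(board[i])):
-- 			if j % 2 == 0 and board[i][j] not in b: minFix1 += 1
-- 			if j % 2 == 1 and board[i][j] not in w: minFix1 += 1
-- 			if j % 2 == 0 and board[i][j] not in w: minFix2 += 1
-- 			if j % 2 == 1 and board[i][j] not in b: minFix2 += 1
-- 	for i in range(1, len(board), 2):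
-- 		for j in range(len(board[i])):
-- 			if j % 2 == 0 and board[i][j] not in b: minFix2 += 1
-- 			if j % 2 == 1 and board[i][j] not in w: minFix2 += 1
-- 			if j % 2 == 0 and board[i][j] not in w: minFix1 += 1
-- 			if j % 2 == 1 and board[i][j] not in b: minFix1 += 1
--
-- 	if minFix1 > 0 and minFix2 > 0: return "Impossible"
-- 	return 'Possible'
-- ===== SOURCE B (Python) =====
-- _FLIP = str.maketrans('BW', 'WB')
--
-- def ableToDraw(board):
--     # Normalize every cell into the colour frame of cell (0,0): on cells of odd
--     # overall parity (i+j) the colour is swapped.  The board admits a checkerboard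
--     # colouring iff at most one colour besides '?' survives normalization.
--     colors = set()
--     for i, row in enumerate(board):
--         same = row[i % 2 :: 2]                          # cells with (i+j) even
--         swapped = row[1 - i % 2 :: 2].translate(_FLIP)  # cells with (i+j) odd, colours swapped
--         colors |= set(same + swapped) - {'?'}
--     return 'Possible' if colors <= {'B'} or colors <= {'W'} else 'Impossible'
-- ===== Notes on version B (the rewrite author's own statement) =====
-- stated objective: alternative
-- what changed: A counts per-template mismatches with two integer counters over two parity-split row loops; B normalizes every cell into the colour frame of cell (0,0) using strided row slices plus a B/W-swapping translation table, collects the distinct surviving colours in one set, and decides by set inclusion (at most one colour besides '?').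
import Mathlib
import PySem

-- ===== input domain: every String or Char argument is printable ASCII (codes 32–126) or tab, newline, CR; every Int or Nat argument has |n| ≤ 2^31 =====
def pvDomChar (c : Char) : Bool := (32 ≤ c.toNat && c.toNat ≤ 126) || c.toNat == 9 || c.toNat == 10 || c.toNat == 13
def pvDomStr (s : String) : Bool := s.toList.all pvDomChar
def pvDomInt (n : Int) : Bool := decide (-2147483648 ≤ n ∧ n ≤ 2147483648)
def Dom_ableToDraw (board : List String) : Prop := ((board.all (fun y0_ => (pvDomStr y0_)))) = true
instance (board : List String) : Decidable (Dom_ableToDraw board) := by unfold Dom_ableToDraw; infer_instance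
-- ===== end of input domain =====

-- B normalizes each cell into the colour frame of cell (0,0) via strided slices and a B/W swap,
-- then decides by inclusion of the set of surviving colours (objective: alternative).

-- ===== PORT A =====
-- 'board[i][j] not in "B?"' tests substring membership on the one-character string board[i][j],
-- which is exactly ¬(c = 'B' ∨ c = '?'); chars of board[i] are accessed via toList + pyGetD
-- (index j is always in range, so the default is never used).
def ableToDraw (board : List String) : String :=
  let n : Int := (board.length : Int)
  let r1 := (PySem.List.pyRange 0 n 2).foldl (fun (acc : Int × Int) i =>
    let row := (PySem.List.pyGetD board i "").toList
    (PySem.List.pyRange 0 (row.length : Int) 1).foldl (fun (acc : Int × Int) j =>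
      let c := PySem.List.pyGetD row j ' '
      let m1 := if PySem.Int.mod j 2 == 0 && !(c == 'B' || c == '?') then acc.1 + 1 else acc.1
      let m1 := if PySem.Int.mod j 2 == 1 && !(c == 'W' || c == '?') then m1 + 1 else m1
      let m2 := if PySem.Int.mod j 2 == 0 && !(c == 'W' || c == '?') then acc.2 + 1 else acc.2
      let m2 := if PySem.Int.mod j 2 == 1 && !(c == 'B' || c == '?') then m2 + 1 else m2
      (m1, m2)) acc) (0, 0)
  let r2 := (PySem.List.pyRange 1 n 2).foldl (fun (acc : Int × Int) i =>
    let row := (PySem.List.pyGetD board i "").toList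
    (PySem.List.pyRange 0 (row.length : Int) 1).foldl (fun (acc : Int × Int) j =>
      let c := PySem.List.pyGetD row j ' '
      let m2 := if PySem.Int.mod j 2 == 0 && !(c == 'B' || c == '?') then acc.2 + 1 else acc.2
      let m2 := if PySem.Int.mod j 2 == 1 && !(c == 'W' || c == '?') then m2 + 1 else m2
      let m1 := if PySem.Int.mod j 2 == 0 && !(c == 'W' || c == '?') then acc.1 + 1 else acc.1
      let m1 := if PySem.Int.mod j 2 == 1 && !(c == 'B' || c == '?') then m1 + 1 else m1
      (m1, m2)) acc) r1
  if 0 < r2.1 ∧ 0 < r2.2 then "Impossible" else "Possible"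

-- ===== PORT B =====
-- str.maketrans('BW','WB') + translate swaps 'B' and 'W' and leaves every other char alone:
def pvFlip (c : Char) : Char := if c == 'B' then 'W' else if c == 'W' then 'B' else c

-- row[a::2] is slice? with step 2, which never raises (step ≠ 0), so .getD [] is exact.
def ableToDraw_alt (board : List String) : String :=
  let colors : PySem.Set Char := (PySem.List.enumerate board).foldl
    (fun (colors : PySem.Set Char) p =>
      let row := p.2.toList
      let same := (PySem.List.slice? row (some (PySem.Int.mod p.1 2)) none 2).getD []
      let swapped := ((PySem.List.slice? row (some (1 - PySem.Int.mod p.1 2)) none 2).getD []).map pvFlip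
      PySem.Set.union colors (PySem.Set.diff (PySem.Set.ofList (same ++ swapped)) ['?']))
    PySem.Set.empty
  if PySem.Set.issubset colors ['B'] || PySem.Set.issubset colors ['W'] then "Possible" else "Impossible"

-- ===== PRECONDITION & SPEC =====
def Spec_ableToDraw (board : List String) (out : String) : Prop := out = ableToDraw_alt board
instance (board : List String) (out : String) : Decidable (Spec_ableToDraw board out) := by unfold Spec_ableToDraw; infer_instance

-- ===== CLAIM (what is proved, stated in full; the proofs are below) =====
def Claim_equal_ableToDraw : Prop := ∀ (board : List String), Dom_ableToDraw board → Spec_ableToDraw board (ableToDraw board)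

-- ===== LEMMAS AND PROOFS =====

-- Python's j % 2 (PySem.Int.mod = fmod) agrees with Lean's emod for the divisor 2.
theorem pvMod2 (j : Int) : PySem.Int.mod j 2 = j % 2 := by
  simp [PySem.Int.mod, Int.fmod_eq_emod]

-- a cell at overall parity p is bad for the template that puts x on parity 0 and y on parity 1
def pvCB (x y : Char) (p : Int) (c : Char) : Bool :=
  if p % 2 = 0 then !(c == x || c == '?') else !(c == y || c == '?')

def pvRow (board : List String) (i : Int) : List Char := (PySem.List.pyGetD board i "").toList

def pvCnt (x y : Char) (i : Int) (s : List Char) : Int :=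
  ((PySem.List.pyRange 0 (s.length : Int) 1).map
    (fun j => if pvCB x y (i + j) (PySem.List.pyGetD s j ' ') then (1 : Int) else 0)).sum

def pvBad (x y : Char) (i : Int) (s : List Char) : Bool :=
  (PySem.List.pyRange 0 (s.length : Int) 1).any
    (fun j => pvCB x y (i + j) (PySem.List.pyGetD s j ' '))

def pvS (x y : Char) (board : List String) : Int :=
  ((PySem.List.pyRange 0 (board.length : Int) 2).map (fun i => pvCnt x y i (pvRow board i))).sum +
  ((PySem.List.pyRange 1 (board.length : Int) 2).map (fun i => pvCnt x y i (pvRow board i))).sum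

theorem pv_sum_ite_nonneg {α : Type} (l : List α) (u : α → Bool) :
    0 ≤ (l.map (fun x => if u x then (1 : Int) else 0)).sum := by
  induction l with
  | nil => simp
  | cons x xs ih => by_cases h : u x <;> simp [h] <;> omega

theorem pv_sum_ite_eq_zero {α : Type} (l : List α) (u : α → Bool) :
    ((l.map (fun x => if u x then (1 : Int) else 0)).sum = 0) ↔ l.any u = false := by
  induction l with
  | nil => simp
  | cons x xs ih =>
    have := pv_sum_ite_nonneg xs u
    by_cases h : u x
    · simp [h]
      omega
    · simp [h, ih]

theorem pv_sum_map_eq_zero_iff {α : Type} (l : List α) (u : α → Int) (h : ∀ x ∈ l, 0 ≤ u x) :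
    (l.map u).sum = 0 ↔ ∀ x ∈ l, u x = 0 := by
  induction l with
  | nil => simp
  | cons x xs ih =>
    have h0 : 0 ≤ u x := h x (by simp)
    have hs : 0 ≤ (xs.map u).sum := List.sum_nonneg (by
      intro y hy
      obtain ⟨z, hz, rfl⟩ := List.mem_map.mp hy
      exact h z (by simp [hz]))
    have ih' := ih (fun z hz => h z (by simp [hz]))
    simp only [List.map_cons, List.sum_cons, List.mem_cons]
    constructor
    · intro he
      have h1 : u x = 0 := by omega
      have h2 : (xs.map u).sum = 0 := by omega
      intro z hz
      rcases hz with rfl | hz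
      · exact h1
      · exact ih'.mp h2 z hz
    · intro hz
      have h1 : u x = 0 := hz x (Or.inl rfl)
      have h2 : (xs.map u).sum = 0 := ih'.mpr (fun z hzz => hz z (Or.inr hzz))
      omega

theorem pvCnt_nonneg (x y : Char) (i : Int) (s : List Char) : 0 ≤ pvCnt x y i s :=
  pv_sum_ite_nonneg _ _

theorem pvCnt_eq_zero_iff (x y : Char) (i : Int) (s : List Char) :
    pvCnt x y i s = 0 ↔ pvBad x y i s = false := pv_sum_ite_eq_zero _ _

-- the characterization of port A's counters
theorem pv_foldl_pair_add_mem {α : Type} (l : List α) (f : Int × Int → α → Int × Int)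
    (u v : α → Int) (h : ∀ (acc : Int × Int), ∀ x ∈ l, f acc x = (acc.1 + u x, acc.2 + v x))
    (init : Int × Int) :
    l.foldl f init = (init.1 + (l.map u).sum, init.2 + (l.map v).sum) := by
  induction l generalizing init with
  | nil => simp
  | cons x xs ih =>
    rw [List.foldl_cons, h init x (by simp),
      ih (fun acc z hz => h acc z (by simp [hz])) _]
    simp
    constructor <;> ring

-- the even-row pass of port A adds, per even row i, the template mismatch counts of that row
theorem pvA_even (board : List String) (init : Int × Int) :
    (PySem.List.pyRange 0 ((board.length : Int)) 2).foldl (fun (acc : Int × Int) i =>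
      let row := (PySem.List.pyGetD board i "").toList
      (PySem.List.pyRange 0 (row.length : Int) 1).foldl (fun (acc : Int × Int) j =>
        let c := PySem.List.pyGetD row j ' '
        let m1 := if PySem.Int.mod j 2 == 0 && !(c == 'B' || c == '?') then acc.1 + 1 else acc.1
        let m1 := if PySem.Int.mod j 2 == 1 && !(c == 'W' || c == '?') then m1 + 1 else m1
        let m2 := if PySem.Int.mod j 2 == 0 && !(c == 'W' || c == '?') then acc.2 + 1 else acc.2
        let m2 := if PySem.Int.mod j 2 == 1 && !(c == 'B' || c == '?') then m2 + 1 else m2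
        (m1, m2)) acc) init
    = (init.1 + ((PySem.List.pyRange 0 ((board.length : Int)) 2).map
          (fun i => pvCnt 'B' 'W' i (pvRow board i))).sum,
       init.2 + ((PySem.List.pyRange 0 ((board.length : Int)) 2).map
          (fun i => pvCnt 'W' 'B' i (pvRow board i))).sum) := by
  refine pv_foldl_pair_add_mem _ _ _ _ ?_ init
  intro acc i hi
  rw [PySem.List.mem_pyRange_iff_of_pos (by norm_num)] at hi
  have hpar : i % 2 = 0 := by omega
  refine pv_foldl_pair_add_mem _ _ _ _ ?_ acc
  intro acc2 j hj
  rw [PySem.List.mem_pyRange_one] at hj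
  simp only [pvMod2]
  have hp : j % 2 = 0 ∨ j % 2 = 1 := by omega
  rcases hp with hp | hp
  · have p1 : (i + j) % 2 = 0 := by omega
    simp [hp, p1, pvCB, pvRow]
    split_ifs <;> omega
  · have p1 : (i + j) % 2 = 1 := by omega
    simp [hp, p1, pvCB, pvRow]
    split_ifs <;> omega

-- the odd-row pass of port A adds, per odd row i, the template mismatch counts of that row
theorem pvA_odd (board : List String) (init : Int × Int) :
    (PySem.List.pyRange 1 ((board.length : Int)) 2).foldl (fun (acc : Int × Int) i =>
      let row := (PySem.List.pyGetD board i "").toList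
      (PySem.List.pyRange 0 (row.length : Int) 1).foldl (fun (acc : Int × Int) j =>
        let c := PySem.List.pyGetD row j ' '
        let m2 := if PySem.Int.mod j 2 == 0 && !(c == 'B' || c == '?') then acc.2 + 1 else acc.2
        let m2 := if PySem.Int.mod j 2 == 1 && !(c == 'W' || c == '?') then m2 + 1 else m2
        let m1 := if PySem.Int.mod j 2 == 0 && !(c == 'W' || c == '?') then acc.1 + 1 else acc.1
        let m1 := if PySem.Int.mod j 2 == 1 && !(c == 'B' || c == '?') then m1 + 1 else m1
        (m1, m2)) acc) init
    = (init.1 + ((PySem.List.pyRange 1 ((board.length : Int)) 2).map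
          (fun i => pvCnt 'B' 'W' i (pvRow board i))).sum,
       init.2 + ((PySem.List.pyRange 1 ((board.length : Int)) 2).map
          (fun i => pvCnt 'W' 'B' i (pvRow board i))).sum) := by
  refine pv_foldl_pair_add_mem _ _ _ _ ?_ init
  intro acc i hi
  rw [PySem.List.mem_pyRange_iff_of_pos (by norm_num)] at hi
  have hpar : i % 2 = 1 := by omega
  refine pv_foldl_pair_add_mem _ _ _ _ ?_ acc
  intro acc2 j hj
  rw [PySem.List.mem_pyRange_one] at hj
  simp only [pvMod2]
  have hp : j % 2 = 0 ∨ j % 2 = 1 := by omega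
  rcases hp with hp | hp
  · have p1 : (i + j) % 2 = 1 := by omega
    simp [hp, p1, pvCB, pvRow]
    split_ifs <;> omega
  · have p1 : (i + j) % 2 = 0 := by omega
    simp [hp, p1, pvCB, pvRow]
    split_ifs <;> omega

theorem pvA_eq (board : List String) :
    ableToDraw board =
      if 0 < pvS 'B' 'W' board ∧ 0 < pvS 'W' 'B' board then "Impossible" else "Possible" := by
  simp only [ableToDraw]
  rw [pvA_even board (0, 0), pvA_odd board _]
  norm_num [pvS]

theorem pvS_pos_iff (x y : Char) (board : List String) :
    0 < pvS x y board ↔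
      (PySem.List.pyRange 0 (board.length : Int) 1).any
        (fun i => pvBad x y i (pvRow board i)) = true := by
  have hEnn : 0 ≤ ((PySem.List.pyRange 0 (board.length : Int) 2).map
      (fun i => pvCnt x y i (pvRow board i))).sum := by
    refine List.sum_nonneg ?_
    intro z hz
    obtain ⟨i, _, rfl⟩ := List.mem_map.mp hz
    exact pvCnt_nonneg _ _ _ _
  have hOnn : 0 ≤ ((PySem.List.pyRange 1 (board.length : Int) 2).map
      (fun i => pvCnt x y i (pvRow board i))).sum := by
    refine List.sum_nonneg ?_
    intro z hz
    obtain ⟨i, _, rfl⟩ := List.mem_map.mp hz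
    exact pvCnt_nonneg _ _ _ _
  have hE0 := pv_sum_map_eq_zero_iff (PySem.List.pyRange 0 (board.length : Int) 2)
      (fun i => pvCnt x y i (pvRow board i)) (fun i _ => pvCnt_nonneg _ _ _ _)
  have hO0 := pv_sum_map_eq_zero_iff (PySem.List.pyRange 1 (board.length : Int) 2)
      (fun i => pvCnt x y i (pvRow board i)) (fun i _ => pvCnt_nonneg _ _ _ _)
  have key : pvS x y board = 0 ↔
      (PySem.List.pyRange 0 (board.length : Int) 1).any
        (fun i => pvBad x y i (pvRow board i)) = false := by
    unfold pvS
    constructor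
    · intro h
      rw [List.any_eq_false]
      intro i hi
      rw [PySem.List.mem_pyRange_one] at hi
      have hE := hE0.mp (by omega)
      have hO := hO0.mp (by omega)
      have hpd : (2 : Int) ∣ i - 0 ∨ (2 : Int) ∣ i - 1 := by omega
      rcases hpd with hp | hp
      · have hb := (pvCnt_eq_zero_iff _ _ _ _).mp
          (hE i ((PySem.List.mem_pyRange_iff_of_pos (by norm_num) i).mpr ⟨by omega, by omega, hp⟩))
        simp [hb]
      · have hb := (pvCnt_eq_zero_iff _ _ _ _).mp
          (hO i ((PySem.List.mem_pyRange_iff_of_pos (by norm_num) i).mpr ⟨by omega, by omega, hp⟩))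
        simp [hb]
    · intro h
      rw [List.any_eq_false] at h
      have hE : ((PySem.List.pyRange 0 (board.length : Int) 2).map
          (fun i => pvCnt x y i (pvRow board i))).sum = 0 := by
        refine hE0.mpr ?_
        intro i hi
        rw [PySem.List.mem_pyRange_iff_of_pos (by norm_num)] at hi
        have hbi := h i (PySem.List.mem_pyRange_one.mpr ⟨by omega, by omega⟩)
        rw [Bool.not_eq_true] at hbi
        exact (pvCnt_eq_zero_iff _ _ _ _).mpr hbi
      have hO : ((PySem.List.pyRange 1 (board.length : Int) 2).map
          (fun i => pvCnt x y i (pvRow board i))).sum = 0 := by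
        refine hO0.mpr ?_
        intro i hi
        rw [PySem.List.mem_pyRange_iff_of_pos (by norm_num)] at hi
        have hbi := h i (PySem.List.mem_pyRange_one.mpr ⟨by omega, by omega⟩)
        rw [Bool.not_eq_true] at hbi
        exact (pvCnt_eq_zero_iff _ _ _ _).mpr hbi
      omega
  have hnn : 0 ≤ pvS x y board := by unfold pvS; omega
  cases hb : (PySem.List.pyRange 0 (board.length : Int) 1).any
      (fun i => pvBad x y i (pvRow board i)) with
  | false =>
    have h0 := key.mpr hb
    simp [h0]
  | true =>
    have hne : pvS x y board ≠ 0 := by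
      intro h0
      have hf := key.mp h0
      rw [hf] at hb
      cases hb
    simp only [iff_true]
    omega

-- ===== B-side lemmas =====

-- the normalized colour of a cell at overall parity p holding char c
def pvNorm (p : Int) (c : Char) : Char := if p % 2 = 0 then c else pvFlip c

-- membership in row[a::2] for a < 2: exactly the chars at indices of parity a
theorem pvMemStride (xs : List Char) (a : Nat) (ha : a < 2) (c : Char) :
    (c ∈ (PySem.List.slice? xs (some (a : Int)) none 2).getD []) ↔
      ∃ j : Nat, j % 2 = a ∧ xs[j]? = some c := by
  simp only [PySem.List.slice?, PySem.List.sliceIndices]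
  norm_num
  rw [if_neg (show ¬((a:Int) < 0) by omega)]
  rcases Nat.lt_or_ge a xs.length with hlt | hge
  · rw [min_eq_left (by exact_mod_cast hlt.le)]
    rw [if_pos (by exact_mod_cast hlt)]
    constructor
    · rintro ⟨k, hk, hxk⟩
      refine ⟨a + 2*k, by omega, ?_⟩
      rwa [show ((a:Int) + 2*(k:Int)).toNat = a + 2*k by omega] at hxk
    · rintro ⟨j, hj2, hxj⟩
      have hjlen : j < xs.length := by
        rcases List.getElem?_eq_some_iff.mp hxj with ⟨h, _⟩; exact h
      refine ⟨(j - a)/2, by omega, ?_⟩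
      rw [show ((a:Int) + 2*((((j-a)/2 : Nat)):Int)).toNat = j by omega]
      exact hxj
  · rw [min_eq_right (by exact_mod_cast hge)]
    rw [if_neg (lt_irrefl _)]
    constructor
    · rintro ⟨k, hk, _⟩; omega
    · rintro ⟨j, hj2, hxj⟩
      have hjlen : j < xs.length := by
        rcases List.getElem?_eq_some_iff.mp hxj with ⟨h, _⟩; exact h
      omega

-- folding unions collects exactly the per-element memberships
theorem pvMemFoldUnion {α β : Type} [BEq α] [LawfulBEq α] (l : List β) (g : β → PySem.Set α)
    (init : PySem.Set α) (c : α) :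
    c ∈ l.foldl (fun s p => PySem.Set.union s (g p)) init ↔ c ∈ init ∨ ∃ p ∈ l, c ∈ g p := by
  induction l generalizing init with
  | nil => simp
  | cons x xs ih =>
    rw [List.foldl_cons, ih, PySem.Set.mem_union]
    simp [or_assoc]

-- what translate(maketrans('BW','WB')) does, char by char
theorem pvFlip_eq_qmark (d : Char) : pvFlip d = '?' ↔ d = '?' := by
  unfold pvFlip
  by_cases hB : d = 'B' <;> by_cases hW : d = 'W' <;> simp_all

theorem pvFlip_eq_B (d : Char) : pvFlip d = 'B' ↔ d = 'W' := by
  unfold pvFlip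
  by_cases hB : d = 'B' <;> by_cases hW : d = 'W' <;> simp_all

theorem pvFlip_eq_W (d : Char) : pvFlip d = 'W' ↔ d = 'B' := by
  unfold pvFlip
  by_cases hB : d = 'B' <;> by_cases hW : d = 'W' <;> simp_all

-- one row's contribution to B's colour set: the normalized non-'?' colours of the row
theorem pvRowMem (row : List Char) (i : Int) (c : Char) :
    ((c ∈ (PySem.List.slice? row (some (PySem.Int.mod i 2)) none 2).getD [] ++
        ((PySem.List.slice? row (some (1 - PySem.Int.mod i 2)) none 2).getD []).map pvFlip) ∧ c ≠ '?') ↔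
      ∃ j : Nat, ∃ d : Char, row[j]? = some d ∧ d ≠ '?' ∧ pvNorm (i + j) d = c := by
  rw [pvMod2]
  set a : Nat := (i % 2).toNat with hadef
  have hA : ((a : Int)) = i % 2 := by omega
  rw [← hA]
  rw [show (1 - (a : Int)) = ((1 - a : Nat) : Int) by omega, List.mem_append, List.mem_map]
  rw [pvMemStride row a (by omega) c]
  constructor
  · rintro ⟨hsame | ⟨d, hd, hfd⟩, hq⟩
    · obtain ⟨j, hj2, hxj⟩ := hsame
      have hev : (i + j) % 2 = 0 := by omega
      exact ⟨j, c, hxj, hq, by simp [pvNorm, hev]⟩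
    · obtain ⟨j, hj2, hxj⟩ := (pvMemStride row (1 - a) (by omega) d).mp hd
      have hod : (i + j) % 2 = 1 := by omega
      refine ⟨j, d, hxj, ?_, by simp [pvNorm, hod, hfd]⟩
      intro h
      exact hq (hfd ▸ (pvFlip_eq_qmark d).mpr h ▸ rfl)
  · rintro ⟨j, d, hxj, hd, hnorm⟩
    have hp : (i + j) % 2 = 0 ∨ (i + j) % 2 = 1 := by omega
    rcases hp with hev | hod
    · have hc : c = d := by simpa [pvNorm, hev] using hnorm.symm
      subst hc
      exact ⟨Or.inl ⟨j, by omega, hxj⟩, hd⟩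
    · have hc : pvFlip d = c := by simpa [pvNorm, hod] using hnorm
      refine ⟨Or.inr ⟨d, (pvMemStride row (1 - a) (by omega) d).mpr ⟨j, by omega, hxj⟩, hc⟩, ?_⟩
      intro h
      exact hd ((pvFlip_eq_qmark d).mp (hc.trans h))

-- membership in B's colour set, over the whole board
theorem pvMemColors (board : List String) (c : Char) :
    (c ∈ (PySem.List.enumerate board).foldl
      (fun (colors : PySem.Set Char) p =>
        PySem.Set.union colors (PySem.Set.diff (PySem.Set.ofList
          ((PySem.List.slice? p.2.toList (some (PySem.Int.mod p.1 2)) none 2).getD [] ++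
           ((PySem.List.slice? p.2.toList (some (1 - PySem.Int.mod p.1 2)) none 2).getD []).map pvFlip))
          ['?']))
      PySem.Set.empty) ↔
    ∃ i ∈ PySem.List.pyRange 0 (board.length : Int) 1, ∃ j : Nat, ∃ d : Char,
      (pvRow board i)[j]? = some d ∧ d ≠ '?' ∧ pvNorm (i + j) d = c := by
  rw [PySem.List.enumerate_eq_map_pyRange board "", List.foldl_map]
  rw [pvMemFoldUnion]
  simp only [PySem.Set.empty, List.not_mem_nil, false_or, PySem.List.len]
  refine exists_congr (fun i => and_congr_right (fun hi => ?_))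
  rw [PySem.Set.mem_diff, PySem.Set.mem_ofList]
  have : (c ∉ (['?'] : PySem.Set Char)) ↔ c ≠ '?' := by simp
  rw [this]
  exact pvRowMem _ i c

-- a cell is bad for a template iff its normalized colour is fixed and differs from the template's base colour
theorem pvCell_B (p : Int) (d : Char) : pvCB 'B' 'W' p d = true ↔ d ≠ '?' ∧ pvNorm p d ≠ 'B' := by
  have hp : p % 2 = 0 ∨ p % 2 = 1 := by omega
  rcases hp with hp | hp <;> simp [pvCB, pvNorm, hp, pvFlip_eq_B] <;> tauto

theorem pvCell_W (p : Int) (d : Char) : pvCB 'W' 'B' p d = true ↔ d ≠ '?' ∧ pvNorm p d ≠ 'W' := by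
  have hp : p % 2 = 0 ∨ p % 2 = 1 := by omega
  rcases hp with hp | hp <;> simp [pvCB, pvNorm, hp, pvFlip_eq_W] <;> tauto

-- A's "some mismatch for the template with x on parity 0" as a statement about normalized cells
theorem pvBadAny (board : List String) (x y : Char)
    (hcell : ∀ (p : Int) (d : Char), pvCB x y p d = true ↔ d ≠ '?' ∧ pvNorm p d ≠ x) :
    ((PySem.List.pyRange 0 (board.length : Int) 1).any
        (fun i => pvBad x y i (pvRow board i)) = true) ↔
      ∃ i ∈ PySem.List.pyRange 0 (board.length : Int) 1, ∃ j : Nat, ∃ d : Char,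
        (pvRow board i)[j]? = some d ∧ d ≠ '?' ∧ pvNorm (i + j) d ≠ x := by
  rw [List.any_eq_true]
  refine exists_congr (fun i => and_congr_right (fun hi => ?_))
  unfold pvBad
  rw [List.any_eq_true]
  constructor
  · rintro ⟨jI, hjI, hcb⟩
    rw [PySem.List.mem_pyRange_one] at hjI
    set s := pvRow board i with hs
    obtain ⟨hd, hnx⟩ := (hcell _ _).mp hcb
    refine ⟨jI.toNat, PySem.List.pyGetD s jI ' ', ?_, hd, ?_⟩
    · rw [PySem.List.pyGetD_eq_getElem s ' ' (by omega) (by omega)]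
      exact List.getElem?_eq_getElem (by omega)
    · rwa [show ((jI.toNat : Int)) = jI by omega]
  · rintro ⟨j, d, hxj, hd, hnx⟩
    have hjlen : j < (pvRow board i).length := by
      rcases List.getElem?_eq_some_iff.mp hxj with ⟨h, _⟩; exact h
    refine ⟨(j : Int), PySem.List.mem_pyRange_one.mpr ⟨by omega, by omega⟩, ?_⟩
    refine (hcell _ _).mpr ?_
    have hget : PySem.List.pyGetD (pvRow board i) (j : Int) ' ' = d := by
      rw [PySem.List.pyGetD_natCast]
      simp only [List.getD_eq_getElem?_getD, hxj, Option.getD_some]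
    rw [hget]
    exact ⟨hd, hnx⟩

-- ===== VERDICT (by name: the statement is the Claim_ definition above) =====
theorem ableToDraw_spec : Claim_equal_ableToDraw := by
  intro board _
  unfold Spec_ableToDraw
  rw [pvA_eq]
  simp only [ableToDraw_alt]
  set K := (PySem.List.enumerate board).foldl
      (fun (colors : PySem.Set Char) p =>
        PySem.Set.union colors (PySem.Set.diff (PySem.Set.ofList
          ((PySem.List.slice? p.2.toList (some (PySem.Int.mod p.1 2)) none 2).getD [] ++
           ((PySem.List.slice? p.2.toList (some (1 - PySem.Int.mod p.1 2)) none 2).getD []).map pvFlip))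
          ['?']))
      PySem.Set.empty with hK
  have hmem := pvMemColors board
  have key : ∀ (x y : Char),
      (∀ (p : Int) (d : Char), pvCB x y p d = true ↔ d ≠ '?' ∧ pvNorm p d ≠ x) →
      ((PySem.Set.issubset K [x] = true) ↔ ¬ (0 < pvS x y board)) := by
    intro x y hcell
    rw [pvS_pos_iff, pvBadAny board x y hcell, PySem.Set.issubset_iff]
    constructor
    · rintro hall ⟨i, hi, j, d, hxj, hd, hnx⟩
      exact hnx (by
        have := hall (pvNorm (i + j) d) ((hmem _).mpr ⟨i, hi, j, d, hxj, hd, rfl⟩)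
        simpa using this)
    · intro hno c hc
      obtain ⟨i, hi, j, d, hxj, hd, hnc⟩ := (hmem c).mp hc
      by_contra hne
      exact hno ⟨i, hi, j, d, hxj, hd, by simp only [List.mem_singleton] at hne; rw [hnc]; exact hne⟩
  have k1 := key 'B' 'W' pvCell_B
  have k2 := key 'W' 'B' pvCell_W
  by_cases hp1 : 0 < pvS 'B' 'W' board <;> by_cases hp2 : 0 < pvS 'W' 'B' board
  · have b1 : PySem.Set.issubset K ['B'] = false := by
      rw [Bool.eq_false_iff]; intro h; exact (k1.mp h) hp1
    have b2 : PySem.Set.issubset K ['W'] = false := by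
      rw [Bool.eq_false_iff]; intro h; exact (k2.mp h) hp2
    simp [hp1, hp2, b1, b2]
  · have b2 : PySem.Set.issubset K ['W'] = true := k2.mpr hp2
    simp [hp1, hp2, b2]
  · have b1 : PySem.Set.issubset K ['B'] = true := k1.mpr hp1
    simp [hp1, hp2, b1]
  · have b1 : PySem.Set.issubset K ['B'] = true := k1.mpr hp1
    simp [hp1, hp2, b1]
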